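-- pv_equiv track=rewrite | github.com/ihwasabi/binary-calculator | main.py | inverser_bits
-- ===== SOURCE A (Python) =====
-- def is_binary(nb_binaire: str) -> bool:
--   setNumber = set(nb_binaire)
--   if {"0", "1"} != setNumber and setNumber != {'0'} and setNumber != {'1'}:
--     return False
--   else:
--     return True
--
-- def écriture_sur_Nbits(nb_binaire: str, N: int) -> str:
--   if is_binary(nb_binaire):
--     return (N - len(nb_binaire)) * "0" + nb_binaire
--
-- def inverser_bits(nb_binaire: str, N: int) -> str:
--   if is_binary(nb_binaire):
--     final = ""
--     for bit in nb_binaire: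
--       if bit == "1":
--         final += "0"
--       else:
--         final += "1"
--
--     return écriture_sur_Nbits(final, N)
-- ===== SOURCE B (Python) =====
-- def is_binary(nb_binaire: str) -> bool:
--   setNumber = set(nb_binaire)
--   if {"0", "1"} != setNumber and setNumber != {'0'} and setNumber != {'1'}:
--     return False
--   else:
--     return True
--
-- def inverser_bits(nb_binaire: str, N: int) -> str:
--   if is_binary(nb_binaire):
--     n = len(nb_binaire)
--     inverted = format(int(nb_binaire, 2) ^ ((1 << n) - 1), '0{}b'.format(n))
--     return (N - n) * "0" + inverted
-- ===== Notes on version B (the rewrite author's own statement) =====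
-- stated objective: alternative
-- what changed: Replaces the per-character flip loop with whole-number arithmetic: parse the string as an integer, XOR with an all-ones mask of the same bit width, and re-format with leading zeros before padding.
import Mathlib
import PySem

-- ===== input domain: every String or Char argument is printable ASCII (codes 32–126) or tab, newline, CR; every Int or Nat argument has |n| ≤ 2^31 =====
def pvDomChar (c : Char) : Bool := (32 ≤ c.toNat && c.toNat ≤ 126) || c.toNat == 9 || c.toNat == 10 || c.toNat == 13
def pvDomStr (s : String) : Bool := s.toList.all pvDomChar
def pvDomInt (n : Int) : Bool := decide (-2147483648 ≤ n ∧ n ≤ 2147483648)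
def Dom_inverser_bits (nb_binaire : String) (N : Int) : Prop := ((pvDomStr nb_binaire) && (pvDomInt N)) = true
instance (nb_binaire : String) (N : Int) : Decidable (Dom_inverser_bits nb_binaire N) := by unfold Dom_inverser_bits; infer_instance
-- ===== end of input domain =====

-- B replaces A's per-character flip loop with integer parse / XOR-with-all-ones-mask / re-format (an alternative algorithm, not claimed faster).

-- ===== PORT A =====
-- is_binary: setNumber = set(nb_binaire); the three Python set == comparisons are PySem.Set.equal
def is_binary (nb_binaire : String) : Bool :=
  let setNumber := PySem.Set.ofList nb_binaire.toList
  if !(PySem.Set.equal (PySem.Set.ofList ['0', '1']) setNumber)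
      && !(PySem.Set.equal setNumber (PySem.Set.ofList ['0']))
      && !(PySem.Set.equal setNumber (PySem.Set.ofList ['1'])) then
    false
  else
    true

-- (N - len) * "0" + nb_binaire : Python string repetition clamps a negative count to "" — (·).toNat does exactly that
def ecriture_sur_Nbits (nb_binaire : String) (N : Int) : Option String :=
  if is_binary nb_binaire then
    some (String.ofList (List.replicate (N - (nb_binaire.toList.length : Int)).toNat '0' ++ nb_binaire.toList))
  else none

def inverser_bits (nb_binaire : String) (N : Int) : Option String :=
  if is_binary nb_binaire then
    let final := nb_binaire.toList.foldl
      (fun acc bit => if bit = '1' then acc ++ ['0'] else acc ++ ['1']) ([] : List Char)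
    ecriture_sur_Nbits (String.ofList final) N
  else none

-- ===== PORT B =====
-- int(s, 2) for a string of '0'/'1' digits (B only calls it under the is_binary guard); exact there
def parseBin (l : List Char) : Nat :=
  l.foldl (fun a c => 2 * a + (if c = '1' then 1 else 0)) 0

-- format(v, '0{w}b') for 0 ≤ v < 2^w: exactly w binary digits, most significant first
def toBinWidth : Nat → Nat → List Char
  | 0, _ => []
  | w + 1, v => toBinWidth w (v / 2) ++ [if v % 2 = 1 then '1' else '0']

def inverser_bits_alt (nb_binaire : String) (N : Int) : Option String :=
  if is_binary nb_binaire then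
    let n := nb_binaire.toList.length
    let inverted := toBinWidth n (parseBin nb_binaire.toList ^^^ ((1 <<< n) - 1))
    some (String.ofList (List.replicate (N - (n : Int)).toNat '0' ++ inverted))
  else none

-- ===== PRECONDITION & SPEC =====
def Spec_inverser_bits (nb_binaire : String) (N : Int) (out : Option String) : Prop := out = inverser_bits_alt nb_binaire N
instance (nb_binaire : String) (N : Int) (out : Option String) : Decidable (Spec_inverser_bits nb_binaire N out) := by unfold Spec_inverser_bits; infer_instance

-- ===== CLAIM (what is proved, stated in full; the proofs are below) =====
def Claim_equal_inverser_bits : Prop := ∀ (nb_binaire : String) (N : Int), Dom_inverser_bits nb_binaire N → Spec_inverser_bits nb_binaire N (inverser_bits nb_binaire N)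

-- ===== LEMMAS AND PROOFS =====

theorem tb0 (k r : Nat) (hr : r < 2) : (2 * k + r).testBit 0 = decide (r = 1) := by
  rw [Nat.testBit_zero]; interval_cases r <;> simp

theorem tbs (k r i : Nat) (hr : r < 2) : (2 * k + r).testBit (i + 1) = k.testBit i := by
  rw [Nat.testBit_succ]; congr 1; omega

theorem xor_two_mul_add (a b x y : Nat) (hx : x < 2) (hy : y < 2) :
    (2 * a + x) ^^^ (2 * b + y) = 2 * (a ^^^ b) + (x ^^^ y) := by
  have hxy : x ^^^ y < 2 := by interval_cases x <;> interval_cases y <;> decide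
  apply Nat.eq_of_testBit_eq; intro i
  rw [Nat.testBit_xor]
  cases i with
  | zero =>
    rw [tb0 _ _ hx, tb0 _ _ hy, tb0 _ _ hxy]
    interval_cases x <;> interval_cases y <;> decide
  | succ i =>
    rw [tbs _ _ _ hx, tbs _ _ _ hy, tbs _ _ _ hxy, Nat.testBit_xor]

def flipChar (c : Char) : Char := if c = '1' then '0' else '1'

theorem foldl_flip_eq_map (l : List Char) (acc : List Char) :
    l.foldl (fun acc bit => if bit = '1' then acc ++ ['0'] else acc ++ ['1']) acc
      = acc ++ l.map flipChar := by
  induction l generalizing acc with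
  | nil => simp
  | cons c l ih =>
    simp only [List.foldl_cons, List.map_cons, flipChar]
    by_cases h : c = '1' <;> simp [h, ih]

theorem parseBin_append (l : List Char) (c : Char) :
    parseBin (l ++ [c]) = 2 * parseBin l + (if c = '1' then 1 else 0) := by
  simp [parseBin]

-- the heart: formatting the XOR-complement reproduces A's per-character flip
theorem toBinWidth_xor_eq_map_flip (l : List Char) :
    toBinWidth l.length (parseBin l ^^^ (2 ^ l.length - 1)) = l.map flipChar := by
  induction l using List.reverseRecOn with
  | nil => simp [toBinWidth, parseBin]
  | append_singleton l c ih =>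
    have hb : (if c = '1' then 1 else 0) < 2 := by split <;> decide
    have hmask : 2 ^ (l.length + 1) - 1 = 2 * (2 ^ l.length - 1) + 1 := by
      have : 1 ≤ 2 ^ l.length := Nat.one_le_two_pow
      rw [pow_succ]; omega
    rw [List.length_append, List.length_cons, List.length_nil, Nat.zero_add,
        parseBin_append, hmask,
        xor_two_mul_add _ _ _ _ hb (by decide)]
    have hlast : ((if c = '1' then 1 else 0) ^^^ 1) = if c = '1' then 0 else 1 := by
      split <;> decide
    set v := parseBin l ^^^ (2 ^ l.length - 1) with hv
    rw [hlast]
    have hdiv : (2 * v + if c = '1' then 0 else 1) / 2 = v := by split <;> omega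
    have hmod : (2 * v + if c = '1' then 0 else 1) % 2 = if c = '1' then 0 else 1 := by
      split <;> omega
    show toBinWidth (l.length + 1) _ = _
    rw [toBinWidth, hdiv, hmod, ih]
    simp only [List.map_append, List.map_cons, List.map_nil, flipChar]
    split <;> simp

theorem equal_ofList_iff (s t : List Char) :
    PySem.Set.equal (PySem.Set.ofList s) (PySem.Set.ofList t) = true ↔ ∀ x, x ∈ s ↔ x ∈ t := by
  rw [PySem.Set.equal_iff]
  simp [PySem.Set.mem_ofList]

theorem is_binary_iff (l : List Char) :
    is_binary (String.ofList l) = true ↔ l ≠ [] ∧ ∀ c ∈ l, c = '0' ∨ c = '1' := by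
  have htl : (String.ofList l).toList = l := by simp
  simp only [is_binary, htl]
  split
  · rename_i h
    simp only [Bool.and_eq_true, Bool.not_eq_true'] at h
    obtain ⟨⟨h1, h2⟩, h3⟩ := h
    constructor
    · intro hfalse; cases hfalse
    · rintro ⟨hne, hsub⟩
      exfalso
      by_cases h0m : '0' ∈ l <;> by_cases h1m : '1' ∈ l
      · have : PySem.Set.equal (PySem.Set.ofList ['0', '1']) (PySem.Set.ofList l) = true := by
          rw [equal_ofList_iff]
          intro x
          constructor
          · intro hx
            simp only [List.mem_cons, List.not_mem_nil, or_false] at hx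
            rcases hx with rfl | rfl
            · exact h0m
            · exact h1m
          · intro hx
            rcases hsub x hx with rfl | rfl <;> simp
        rw [this] at h1; cases h1
      · have : PySem.Set.equal (PySem.Set.ofList l) (PySem.Set.ofList ['0']) = true := by
          rw [equal_ofList_iff]
          intro x
          constructor
          · intro hx
            rcases hsub x hx with rfl | rfl
            · simp
            · exact absurd hx h1m
          · intro hx
            simp only [List.mem_singleton] at hx
            exact hx ▸ h0m
        rw [this] at h2; cases h2
      · have : PySem.Set.equal (PySem.Set.ofList l) (PySem.Set.ofList ['1']) = true := by
          rw [equal_ofList_iff]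
          intro x
          constructor
          · intro hx
            rcases hsub x hx with rfl | rfl
            · exact absurd hx h0m
            · simp
          · intro hx
            simp only [List.mem_singleton] at hx
            exact hx ▸ h1m
        rw [this] at h3; cases h3
      · cases l with
        | nil => exact hne rfl
        | cons c l' =>
          rcases hsub c List.mem_cons_self with rfl | rfl
          · exact h0m List.mem_cons_self
          · exact h1m List.mem_cons_self
  · rename_i h
    simp only [Bool.and_eq_true, Bool.not_eq_true', not_and_or, Bool.not_eq_false] at h
    constructor
    · intro _
      rcases h with (h1 | h2) | h3
      · rw [equal_ofList_iff] at h1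
        have h0m : '0' ∈ l := (h1 '0').mp (by simp)
        refine ⟨(by rintro rfl; cases h0m), ?_⟩
        intro c hc
        have := (h1 c).mpr hc
        simp only [List.mem_cons, List.not_mem_nil, or_false] at this
        exact this
      · rw [equal_ofList_iff] at h2
        have h0m : '0' ∈ l := (h2 '0').mpr (by simp)
        refine ⟨(by rintro rfl; cases h0m), ?_⟩
        intro c hc
        have := (h2 c).mp hc
        simp only [List.mem_singleton] at this
        exact Or.inl this
      · rw [equal_ofList_iff] at h3
        have h1m : '1' ∈ l := (h3 '1').mpr (by simp)
        refine ⟨(by rintro rfl; cases h1m), ?_⟩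
        intro c hc
        have := (h3 c).mp hc
        simp only [List.mem_singleton] at this
        exact Or.inr this
    · intro _; rfl

theorem is_binary_flip (l : List Char) (hne : l ≠ []) :
    is_binary (String.ofList (l.map flipChar)) = true := by
  rw [is_binary_iff]
  refine ⟨by simpa using hne, ?_⟩
  intro c hc
  rw [List.mem_map] at hc
  obtain ⟨d, _, rfl⟩ := hc
  unfold flipChar; split <;> simp

-- ===== VERDICT (by name: the statement is the Claim_ definition above) =====
theorem inverser_bits_spec : Claim_equal_inverser_bits := by
  intro s N _
  unfold Spec_inverser_bits inverser_bits inverser_bits_alt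
  by_cases h : is_binary s = true
  · simp only [h, if_true]
    have hiff := (is_binary_iff s.toList).mp (by rwa [String.ofList_toList])
    rw [foldl_flip_eq_map, List.nil_append]
    rw [ecriture_sur_Nbits, if_pos (is_binary_flip s.toList hiff.1)]
    rw [show (1 : Nat) <<< s.toList.length = 2 ^ s.toList.length from Nat.one_shiftLeft _]
    rw [toBinWidth_xor_eq_map_flip]
    simp
  · simp [h]
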